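-- pv_equiv track=rewrite | github.com/rxbyes/spring-boot-iot | scripts/manage-risk-point-pending-governance.py | candidate_name_map
-- ===== SOURCE A (Python) =====
-- from typing import Dict, Iterable, List, Sequence
--
-- def normalize_text(value: object) -> str | None:
--     if value is None:
--         return None
--     text = str(value).strip()
--     return text or None
--
-- def candidate_name_map(candidate_entries: Sequence[Dict[str, str]]) -> Dict[str, str]:
--     result: Dict[str, str] = {}
--     for entry in candidate_entries:
--         identifier = normalize_text(entry.get("metricIdentifier"))
--         if not identifier or identifier in result:
--             continue
--         result[identifier] = normalize_text(entry.get("metricName")) or identifier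
--     return result
-- ===== SOURCE B (Python) =====
-- from typing import Dict, Sequence
--
--
-- def normalize_text(value: object) -> str | None:
--     if value is None:
--         return None
--     text = str(value).strip()
--     return text or None
--
--
-- def candidate_name_map(candidate_entries: Sequence[Dict[str, str]]) -> Dict[str, str]:
--     # Pass 1 (reversed): unconditional overwrite, so the FIRST original
--     # occurrence's name wins for every identifier.
--     names: Dict[str, str] = {}
--     for entry in reversed(candidate_entries):
--         if ident := normalize_text(entry.get("metricIdentifier")):
--             names[ident] = normalize_text(entry.get("metricName")) or ident
--     # Pass 2 (forward): dict keyed on first appearance gives first-seen order.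
--     order: Dict[str, None] = {}
--     for entry in candidate_entries:
--         if ident := normalize_text(entry.get("metricIdentifier")):
--             order[ident] = None
--     return {ident: names[ident] for ident in order}
-- ===== Notes on version B (the rewrite author's own statement) =====
-- stated objective: alternative
-- what changed: Replaces the single forward loop with a membership guard by a two-pass algorithm: a reversed pass builds the value map relying on dict-override-keeps-last (so the first original occurrence wins), a forward pass builds the first-seen key order, and a final comprehension assembles the result; no membership test is ever made.
import Mathlib
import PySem

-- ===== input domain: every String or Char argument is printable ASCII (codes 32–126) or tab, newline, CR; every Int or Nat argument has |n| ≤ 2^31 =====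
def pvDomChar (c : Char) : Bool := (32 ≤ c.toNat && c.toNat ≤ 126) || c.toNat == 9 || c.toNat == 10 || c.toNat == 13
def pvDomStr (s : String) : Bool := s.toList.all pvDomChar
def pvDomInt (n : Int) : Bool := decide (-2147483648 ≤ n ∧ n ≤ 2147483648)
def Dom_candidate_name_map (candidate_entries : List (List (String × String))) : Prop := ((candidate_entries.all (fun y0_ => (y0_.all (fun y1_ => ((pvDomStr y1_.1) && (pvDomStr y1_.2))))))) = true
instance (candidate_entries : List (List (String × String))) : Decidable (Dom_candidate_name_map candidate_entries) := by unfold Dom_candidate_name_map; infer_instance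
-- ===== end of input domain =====

-- B rebuilds the map in two passes (reversed overwrite pass for values, forward pass
-- for first-seen key order) instead of A's single guarded loop; alternative, same cost.

-- ===== PORT A =====
-- normalize_text(value): None stays None, otherwise strip; empty string becomes None.
def pvNormText (v : Option String) : Option String :=
  match v with
  | none => none
  | some s => let t := PySem.Str.strip s; if t = "" then none else some t

-- entry.get(key): first-match lookup in the association list (dict)
def pvEntryGet (entry : List (String × String)) (key : String) : Option String :=
  (PySem.Dict.mk entry).get? key

-- normalize_text(entry.get("metricIdentifier"))
def pvIdentOf (entry : List (String × String)) : Option String :=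
  pvNormText (pvEntryGet entry "metricIdentifier")

-- normalize_text(entry.get("metricName")) or identifier
def pvNameOf (entry : List (String × String)) (ident : String) : String :=
  (pvNormText (pvEntryGet entry "metricName")).getD ident

-- A: forward loop; skip falsy identifiers (pvNormText never yields "") and already-present keys.
def candidate_name_map (candidate_entries : List (List (String × String))) : List (String × String) :=
  (candidate_entries.foldl
    (fun (result : PySem.Dict String String) entry =>
      match pvIdentOf entry with
      | none => result                    -- "not identifier": continue
      | some identifier =>
        if result.contains identifier then result   -- "identifier in result": continue
        else result.insert identifier (pvNameOf entry identifier))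
    PySem.Dict.empty).items

-- ===== PORT B =====
def candidate_name_map_alt (candidate_entries : List (List (String × String))) : List (String × String) :=
  -- pass 1: reversed, unconditional overwrite — first original occurrence wins
  let names : PySem.Dict String String :=
    candidate_entries.reverse.foldl
      (fun (d : PySem.Dict String String) entry =>
        match pvIdentOf entry with
        | none => d
        | some ident => d.insert ident (pvNameOf entry ident))
      PySem.Dict.empty
  -- pass 2: forward, key order = first appearance
  let order : PySem.Dict String Unit :=
    candidate_entries.foldl
      (fun (d : PySem.Dict String Unit) entry =>
        match pvIdentOf entry with
        | none => d
        | some ident => d.insert ident ())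
      PySem.Dict.empty
  -- {ident: names[ident] for ident in order}; every key of order is in names,
  -- so getD's default "" is unreachable (totalisation of names[ident])
  order.keys.map (fun ident => (ident, names.getD ident ""))

-- ===== PRECONDITION & SPEC =====
def Spec_candidate_name_map (candidate_entries : List (List (String × String))) (out : List (String × String)) : Prop := out = candidate_name_map_alt candidate_entries
instance (candidate_entries : List (List (String × String))) (out : List (String × String)) : Decidable (Spec_candidate_name_map candidate_entries out) := by unfold Spec_candidate_name_map; infer_instance

-- ===== CLAIM (what is proved, stated in full; the proofs are below) =====
def Claim_equal_candidate_name_map : Prop := ∀ (candidate_entries : List (List (String × String))), Dom_candidate_name_map candidate_entries → Spec_candidate_name_map candidate_entries (candidate_name_map candidate_entries)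

-- ===== LEMMAS AND PROOFS =====

-- the (identifier, resolved name) pairs of the entries whose identifier is truthy
def pvPairs (es : List (List (String × String))) : List (String × String) :=
  es.filterMap (fun e => (pvIdentOf e).map (fun i => (i, pvNameOf e i)))

def pvStepA (d : PySem.Dict String String) (p : String × String) : PySem.Dict String String :=
  if d.contains p.1 then d else d.insert p.1 p.2

-- A's loop, re-expressed over pvPairs
theorem foldA_eq (es : List (List (String × String))) (d : PySem.Dict String String) :
    es.foldl
      (fun result entry =>
        match pvIdentOf entry with
        | none => result
        | some identifier =>
          if result.contains identifier then result
          else result.insert identifier (pvNameOf entry identifier)) d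
    = (pvPairs es).foldl pvStepA d := by
  induction es generalizing d with
  | nil => rfl
  | cons e es ih =>
    cases h : pvIdentOf e <;> simp [pvPairs, h, ih, pvStepA]

-- B's names loop, re-expressed over pvPairs
theorem foldNames_eq (es : List (List (String × String))) (d : PySem.Dict String String) :
    es.foldl
      (fun d entry =>
        match pvIdentOf entry with
        | none => d
        | some ident => d.insert ident (pvNameOf entry ident)) d
    = (pvPairs es).foldl (fun d p => d.insert p.1 p.2) d := by
  induction es generalizing d with
  | nil => rfl
  | cons e es ih =>
    cases h : pvIdentOf e <;> simp [pvPairs, h, ih]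

-- B's order loop, re-expressed over pvPairs
theorem foldOrder_eq (es : List (List (String × String))) (d : PySem.Dict String Unit) :
    es.foldl
      (fun d entry =>
        match pvIdentOf entry with
        | none => d
        | some ident => d.insert ident ()) d
    = (pvPairs es).foldl (fun d p => d.insert p.1 ()) d := by
  induction es generalizing d with
  | nil => rfl
  | cons e es ih =>
    cases h : pvIdentOf e <;> simp [pvPairs, h, ih]

-- value of an unconditional-insert fold over a REVERSED list: the FIRST match wins
theorem getD_revfold (l : List (String × String)) (d : PySem.Dict String String) (k : String) :
    (l.reverse.foldl (fun d p => d.insert p.1 p.2) d).getD k ""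
    = match l.find? (fun p => p.1 == k) with
      | some q => q.2
      | none => d.getD k "" := by
  induction l generalizing d with
  | nil => rfl
  | cons p l ih =>
    rw [List.reverse_cons, List.foldl_append]
    simp only [List.foldl_cons, List.foldl_nil, List.find?_cons]
    rw [PySem.Dict.getD_insert]
    by_cases hk : p.1 = k
    · simp [hk]
    · have hb : (p.1 == k) = false := by simpa using hk
      have ih' := ih d
      rw [List.foldl_reverse] at ih'
      simp [hb, show ¬ k = p.1 from fun h => hk h.symm, ih']

-- value of A's guarded fold: first match wins, keys already present are untouched
theorem getD_foldA (ps : List (String × String)) (d : PySem.Dict String String) (k : String) :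
    (ps.foldl pvStepA d).getD k ""
    = if d.contains k then d.getD k ""
      else match ps.find? (fun p => p.1 == k) with
           | some q => q.2
           | none => "" := by
  induction ps generalizing d with
  | nil =>
    cases h : d.contains k
    · simp [PySem.Dict.getD_of_not_contains d ("" : String) h]
    · simp
  | cons p ps ih =>
    simp only [List.foldl_cons, pvStepA]
    cases hc : d.contains p.1
    · -- identifier not yet present: insert
      simp only [Bool.false_eq_true, if_false, ih]
      by_cases hk : k = p.1
      · subst hk
        simp [PySem.Dict.contains_insert_self, PySem.Dict.getD_insert_self, hc]
      · have hb : (p.1 == k) = false := by simpa using fun h => hk h.symm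
        rw [PySem.Dict.contains_insert, PySem.Dict.getD_insert]
        simp [hk, hb]
    · -- identifier already present: skip
      simp only [if_true, ih]
      cases hkk : d.contains k
      · have hne : (p.1 == k) = false := by
          simp only [beq_eq_false_iff_ne, ne_eq]
          intro h; rw [h] at hc; rw [hc] at hkk; cases hkk
        simp [hne]
      · simp

-- keys of A's guarded fold evolve exactly like keys of an unconditional insert fold
theorem keys_foldA (ps : List (String × String)) (d : PySem.Dict String String) :
    (ps.foldl pvStepA d).keys = PySem.Set.update d.keys (ps.map Prod.fst) := by
  induction ps generalizing d with
  | nil => rfl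
  | cons p ps ih =>
    simp only [List.foldl_cons, pvStepA, List.map_cons, PySem.Set.update, List.foldl_cons]
    cases hc : d.contains p.1
    · have hmem : d.keys.contains p.1 = false := by
        rw [PySem.Dict.contains_eq_decide_mem_keys] at hc
        simpa using hc
      simp only [Bool.false_eq_true, if_false]
      rw [ih, PySem.Dict.keys_insert_of_not_contains d p.2 hc]
      have hnm : p.1 ∉ d.keys := by simpa using hmem
      simp [PySem.Set.update, PySem.Set.add, hnm]
    · have hmem : d.keys.contains p.1 = true := by
        rw [PySem.Dict.contains_eq_decide_mem_keys] at hc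
        simpa using hc
      simp only [if_true]
      rw [ih]
      have hm : p.1 ∈ d.keys := by simpa using hmem
      simp [PySem.Set.update, PySem.Set.add, hm]

-- keys of B's order fold (values are units)
theorem keys_foldOrder (ps : List (String × String)) (d : PySem.Dict String Unit) :
    (ps.foldl (fun d p => d.insert p.1 ()) d).keys = PySem.Set.update d.keys (ps.map Prod.fst) := by
  exact PySem.Dict.keys_foldl_insert_key ps Prod.fst (fun _ _ => ()) d

-- ===== VERDICT (by name: the statement is the Claim_ definition above) =====
theorem candidate_name_map_spec : Claim_equal_candidate_name_map := by
  intro es _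
  unfold Spec_candidate_name_map candidate_name_map candidate_name_map_alt
  dsimp only
  rw [foldA_eq, foldNames_eq, foldOrder_eq, keys_foldOrder]
  have hkeys : ((pvPairs es).foldl pvStepA PySem.Dict.empty).keys
      = PySem.Set.update (PySem.Dict.empty : PySem.Dict String Unit).keys ((pvPairs es).map Prod.fst) := by
    rw [keys_foldA]; rfl
  have hnodup : ((pvPairs es).foldl pvStepA PySem.Dict.empty).keys.Nodup := by
    rw [hkeys]; exact PySem.Set.nodup_update _ _ (by simp)
  rw [PySem.Dict.items_eq_map_keys _ hnodup "", hkeys]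
  have hrev : pvPairs es.reverse = (pvPairs es).reverse := by
    simp [pvPairs, List.filterMap_reverse]
  refine List.map_congr_left ?_
  intro k _
  rw [getD_foldA]
  simp only [PySem.Dict.contains_empty, if_neg (by simp : ¬ (false = true))]
  rw [hrev, getD_revfold]
  cases (pvPairs es).find? (fun p => p.1 == k) <;> rfl
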